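-- pv_equiv track=rewrite | github.com/specialMinority/HouseEvaluator | backend/src/chintai_scraper.py | _bucket_walk_max
-- ===== SOURCE A (Python) =====
-- def _bucket_walk_max(walk_min: int, step_idx: int) -> int:
--     buckets = [1, 3, 5, 7, 10, 15, 20]
--     base = next((b for b in buckets if b >= int(walk_min)), None)
--     # If the listing walk time exceeds the largest supported bucket (typically
--     # 20 minutes), omit the filter rather than excluding the subject listing.
--     if base is None:
--         return int(walk_min)
--     base_i = buckets.index(int(base))
--     i = min(len(buckets) - 1, int(base_i) + max(0, int(step_idx)))
--     return int(buckets[i])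
-- ===== SOURCE B (Python) =====
-- def _bucket_walk_max(walk_min: int, step_idx: int) -> int:
--     buckets = [1, 3, 5, 7, 10, 15, 20]
--     w = int(walk_min)
--     # binary search for the first bucket >= w (bisect_left position)
--     lo, hi = 0, len(buckets)
--     while lo < hi:
--         mid = (lo + hi) // 2
--         if buckets[mid] < w:
--             lo = mid + 1
--         else:
--             hi = mid
--     if lo == len(buckets):
--         return w
--     i = min(len(buckets) - 1, lo + max(0, int(step_idx)))
--     return buckets[i]
-- ===== Notes on version B (the rewrite author's own statement) =====
-- stated objective: alternative
-- what changed: Replaces the generator scan for the first bucket >= walk_min plus a second buckets.index() scan with a single hand-written bisect_left binary search over the sorted bucket list, keeping the >20 passthrough and both clamps.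
import Mathlib
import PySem

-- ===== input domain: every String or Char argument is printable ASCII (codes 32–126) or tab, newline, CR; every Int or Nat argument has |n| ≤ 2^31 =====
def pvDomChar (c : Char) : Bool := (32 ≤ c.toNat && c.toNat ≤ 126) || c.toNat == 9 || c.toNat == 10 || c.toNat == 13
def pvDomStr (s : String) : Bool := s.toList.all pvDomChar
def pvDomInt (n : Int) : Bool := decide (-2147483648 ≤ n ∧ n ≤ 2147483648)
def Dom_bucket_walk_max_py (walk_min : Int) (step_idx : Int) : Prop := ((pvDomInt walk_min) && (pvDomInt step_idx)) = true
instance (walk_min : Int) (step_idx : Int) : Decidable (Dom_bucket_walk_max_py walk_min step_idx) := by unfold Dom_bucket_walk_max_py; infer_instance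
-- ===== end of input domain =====

-- B replaces A's generator scan for the first bucket >= walk_min plus buckets.index()
-- re-scan by a single hand-written bisect_left binary search (alternative decomposition).


-- ===== PORT A =====
def bucket_walk_max_py (walk_min : Int) (step_idx : Int) : Int :=
  let buckets : List Int := [1, 3, 5, 7, 10, 15, 20]
  match buckets.find? (fun b => decide (b ≥ walk_min)) with
  | none => walk_min
  | some base =>
    -- buckets.index(base): base is always a member here, so Python never raises
    let base_i : Int := (PySem.List.index? buckets base).getD 0
    let i : Int := min ((buckets.length : Int) - 1) (base_i + max 0 step_idx)
    -- buckets[i]: 0 ≤ i ≤ 6 always, so Python never raises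
    (PySem.List.pyGet? buckets i).getD 0

-- ===== PORT B =====
-- the `while lo < hi` binary-search loop of B
def bwmGo (buckets : List Int) (w : Int) (lo hi : Nat) : Nat :=
  if lo < hi then
    let mid := (lo + hi) / 2
    -- buckets[mid]: lo ≤ mid < hi ≤ len(buckets), so Python never raises
    if (PySem.List.pyGet? buckets (mid : Int)).getD 0 < w then
      bwmGo buckets w (mid + 1) hi
    else
      bwmGo buckets w lo mid
  else lo
termination_by hi - lo
decreasing_by all_goals omega

def bucket_walk_max_py_alt (walk_min : Int) (step_idx : Int) : Int :=
  let buckets : List Int := [1, 3, 5, 7, 10, 15, 20]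
  let lo := bwmGo buckets walk_min 0 buckets.length
  if lo = buckets.length then walk_min
  else
    let i : Int := min ((buckets.length : Int) - 1) ((lo : Int) + max 0 step_idx)
    -- buckets[i]: 0 ≤ i ≤ 6 always, so Python never raises
    (PySem.List.pyGet? buckets i).getD 0

-- ===== PRECONDITION & SPEC =====
def Spec_bucket_walk_max_py (walk_min : Int) (step_idx : Int) (out : Int) : Prop := out = bucket_walk_max_py_alt walk_min step_idx
instance (walk_min : Int) (step_idx : Int) (out : Int) : Decidable (Spec_bucket_walk_max_py walk_min step_idx out) := by unfold Spec_bucket_walk_max_py; infer_instance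

-- ===== CLAIM (what is proved, stated in full; the proofs are below) =====
def Claim_equal_bucket_walk_max_py : Prop := ∀ (walk_min : Int) (step_idx : Int), Dom_bucket_walk_max_py walk_min step_idx → Spec_bucket_walk_max_py walk_min step_idx (bucket_walk_max_py walk_min step_idx)

-- ===== LEMMAS AND PROOFS =====

-- value of B's binary-search loop on the bucket list, one lemma per region of walk_min
theorem bwmGo_val0 (w : Int) (h2 : w ≤ 1) : bwmGo [1,3,5,7,10,15,20] w 0 7 = 0 := by
  repeat
    rw [bwmGo]
    norm_num [PySem.List.pyGet?, PySem.List.pyIdx?, show Int.toNat 0 = 0 from rfl, show Int.toNat 1 = 1 from rfl, show Int.toNat 2 = 2 from rfl, show Int.toNat 3 = 3 from rfl, show Int.toNat 4 = 4 from rfl, show Int.toNat 5 = 5 from rfl, show Int.toNat 6 = 6 from rfl,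
      show ¬ (1:Int) < w by omega, show ¬ (3:Int) < w by omega, show ¬ (5:Int) < w by omega, show ¬ (7:Int) < w by omega, show ¬ (10:Int) < w by omega, show ¬ (15:Int) < w by omega, show ¬ (20:Int) < w by omega]

theorem bwmGo_val1 (w : Int) (h1 : 1 < w) (h2 : w ≤ 3) : bwmGo [1,3,5,7,10,15,20] w 0 7 = 1 := by
  repeat
    rw [bwmGo]
    norm_num [PySem.List.pyGet?, PySem.List.pyIdx?, show Int.toNat 0 = 0 from rfl, show Int.toNat 1 = 1 from rfl, show Int.toNat 2 = 2 from rfl, show Int.toNat 3 = 3 from rfl, show Int.toNat 4 = 4 from rfl, show Int.toNat 5 = 5 from rfl, show Int.toNat 6 = 6 from rfl,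
      show (1:Int) < w by omega, show ¬ (3:Int) < w by omega, show ¬ (5:Int) < w by omega, show ¬ (7:Int) < w by omega, show ¬ (10:Int) < w by omega, show ¬ (15:Int) < w by omega, show ¬ (20:Int) < w by omega]

theorem bwmGo_val2 (w : Int) (h1 : 3 < w) (h2 : w ≤ 5) : bwmGo [1,3,5,7,10,15,20] w 0 7 = 2 := by
  repeat
    rw [bwmGo]
    norm_num [PySem.List.pyGet?, PySem.List.pyIdx?, show Int.toNat 0 = 0 from rfl, show Int.toNat 1 = 1 from rfl, show Int.toNat 2 = 2 from rfl, show Int.toNat 3 = 3 from rfl, show Int.toNat 4 = 4 from rfl, show Int.toNat 5 = 5 from rfl, show Int.toNat 6 = 6 from rfl,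
      show (1:Int) < w by omega, show (3:Int) < w by omega, show ¬ (5:Int) < w by omega, show ¬ (7:Int) < w by omega, show ¬ (10:Int) < w by omega, show ¬ (15:Int) < w by omega, show ¬ (20:Int) < w by omega]

theorem bwmGo_val3 (w : Int) (h1 : 5 < w) (h2 : w ≤ 7) : bwmGo [1,3,5,7,10,15,20] w 0 7 = 3 := by
  repeat
    rw [bwmGo]
    norm_num [PySem.List.pyGet?, PySem.List.pyIdx?, show Int.toNat 0 = 0 from rfl, show Int.toNat 1 = 1 from rfl, show Int.toNat 2 = 2 from rfl, show Int.toNat 3 = 3 from rfl, show Int.toNat 4 = 4 from rfl, show Int.toNat 5 = 5 from rfl, show Int.toNat 6 = 6 from rfl,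
      show (1:Int) < w by omega, show (3:Int) < w by omega, show (5:Int) < w by omega, show ¬ (7:Int) < w by omega, show ¬ (10:Int) < w by omega, show ¬ (15:Int) < w by omega, show ¬ (20:Int) < w by omega]

theorem bwmGo_val4 (w : Int) (h1 : 7 < w) (h2 : w ≤ 10) : bwmGo [1,3,5,7,10,15,20] w 0 7 = 4 := by
  repeat
    rw [bwmGo]
    norm_num [PySem.List.pyGet?, PySem.List.pyIdx?, show Int.toNat 0 = 0 from rfl, show Int.toNat 1 = 1 from rfl, show Int.toNat 2 = 2 from rfl, show Int.toNat 3 = 3 from rfl, show Int.toNat 4 = 4 from rfl, show Int.toNat 5 = 5 from rfl, show Int.toNat 6 = 6 from rfl,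
      show (1:Int) < w by omega, show (3:Int) < w by omega, show (5:Int) < w by omega, show (7:Int) < w by omega, show ¬ (10:Int) < w by omega, show ¬ (15:Int) < w by omega, show ¬ (20:Int) < w by omega]

theorem bwmGo_val5 (w : Int) (h1 : 10 < w) (h2 : w ≤ 15) : bwmGo [1,3,5,7,10,15,20] w 0 7 = 5 := by
  repeat
    rw [bwmGo]
    norm_num [PySem.List.pyGet?, PySem.List.pyIdx?, show Int.toNat 0 = 0 from rfl, show Int.toNat 1 = 1 from rfl, show Int.toNat 2 = 2 from rfl, show Int.toNat 3 = 3 from rfl, show Int.toNat 4 = 4 from rfl, show Int.toNat 5 = 5 from rfl, show Int.toNat 6 = 6 from rfl,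
      show (1:Int) < w by omega, show (3:Int) < w by omega, show (5:Int) < w by omega, show (7:Int) < w by omega, show (10:Int) < w by omega, show ¬ (15:Int) < w by omega, show ¬ (20:Int) < w by omega]

theorem bwmGo_val6 (w : Int) (h1 : 15 < w) (h2 : w ≤ 20) : bwmGo [1,3,5,7,10,15,20] w 0 7 = 6 := by
  repeat
    rw [bwmGo]
    norm_num [PySem.List.pyGet?, PySem.List.pyIdx?, show Int.toNat 0 = 0 from rfl, show Int.toNat 1 = 1 from rfl, show Int.toNat 2 = 2 from rfl, show Int.toNat 3 = 3 from rfl, show Int.toNat 4 = 4 from rfl, show Int.toNat 5 = 5 from rfl, show Int.toNat 6 = 6 from rfl,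
      show (1:Int) < w by omega, show (3:Int) < w by omega, show (5:Int) < w by omega, show (7:Int) < w by omega, show (10:Int) < w by omega, show (15:Int) < w by omega, show ¬ (20:Int) < w by omega]

theorem bwmGo_val7 (w : Int) (h1 : 20 < w) : bwmGo [1,3,5,7,10,15,20] w 0 7 = 7 := by
  repeat
    rw [bwmGo]
    norm_num [PySem.List.pyGet?, PySem.List.pyIdx?, show Int.toNat 0 = 0 from rfl, show Int.toNat 1 = 1 from rfl, show Int.toNat 2 = 2 from rfl, show Int.toNat 3 = 3 from rfl, show Int.toNat 4 = 4 from rfl, show Int.toNat 5 = 5 from rfl, show Int.toNat 6 = 6 from rfl,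
      show (1:Int) < w by omega, show (3:Int) < w by omega, show (5:Int) < w by omega, show (7:Int) < w by omega, show (10:Int) < w by omega, show (15:Int) < w by omega, show (20:Int) < w by omega]

-- ===== VERDICT (by name: the statement is the Claim_ definition above) =====
theorem bucket_walk_max_py_spec : Claim_equal_bucket_walk_max_py := by
  intro w s _
  unfold Spec_bucket_walk_max_py bucket_walk_max_py bucket_walk_max_py_alt
  rcases (by omega :
      w ≤ 1 ∨ (1 < w ∧ w ≤ 3) ∨ (3 < w ∧ w ≤ 5) ∨ (5 < w ∧ w ≤ 7) ∨ (7 < w ∧ w ≤ 10) ∨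
      (10 < w ∧ w ≤ 15) ∨ (15 < w ∧ w ≤ 20) ∨ 20 < w) with h | h | h | h | h | h | h | h <;>
    [skip; obtain ⟨h1, h2⟩ := h; obtain ⟨h1, h2⟩ := h; obtain ⟨h1, h2⟩ := h;
     obtain ⟨h1, h2⟩ := h; obtain ⟨h1, h2⟩ := h; obtain ⟨h1, h2⟩ := h; skip]
  · norm_num [List.find?, PySem.List.index?, List.idxOf?, bwmGo_val0 w (by omega), show (1:Int) ≥ w by omega,
      show (List.findIdx? (fun x => x == (1:Int)) [1,3,5,7,10,15,20]).getD 0 = 0 by decide]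
  · norm_num [List.find?, PySem.List.index?, List.idxOf?, bwmGo_val1 w (by omega) (by omega), show ¬ (1:Int) ≥ w by omega, show (3:Int) ≥ w by omega,
      show (List.findIdx? (fun x => x == (3:Int)) [1,3,5,7,10,15,20]).getD 0 = 1 by decide]
  · norm_num [List.find?, PySem.List.index?, List.idxOf?, bwmGo_val2 w (by omega) (by omega), show ¬ (1:Int) ≥ w by omega, show ¬ (3:Int) ≥ w by omega, show (5:Int) ≥ w by omega,
      show (List.findIdx? (fun x => x == (5:Int)) [1,3,5,7,10,15,20]).getD 0 = 2 by decide]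
  · norm_num [List.find?, PySem.List.index?, List.idxOf?, bwmGo_val3 w (by omega) (by omega), show ¬ (1:Int) ≥ w by omega, show ¬ (3:Int) ≥ w by omega, show ¬ (5:Int) ≥ w by omega, show (7:Int) ≥ w by omega,
      show (List.findIdx? (fun x => x == (7:Int)) [1,3,5,7,10,15,20]).getD 0 = 3 by decide]
  · norm_num [List.find?, PySem.List.index?, List.idxOf?, bwmGo_val4 w (by omega) (by omega), show ¬ (1:Int) ≥ w by omega, show ¬ (3:Int) ≥ w by omega, show ¬ (5:Int) ≥ w by omega, show ¬ (7:Int) ≥ w by omega, show (10:Int) ≥ w by omega,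
      show (List.findIdx? (fun x => x == (10:Int)) [1,3,5,7,10,15,20]).getD 0 = 4 by decide]
  · norm_num [List.find?, PySem.List.index?, List.idxOf?, bwmGo_val5 w (by omega) (by omega), show ¬ (1:Int) ≥ w by omega, show ¬ (3:Int) ≥ w by omega, show ¬ (5:Int) ≥ w by omega, show ¬ (7:Int) ≥ w by omega, show ¬ (10:Int) ≥ w by omega, show (15:Int) ≥ w by omega,
      show (List.findIdx? (fun x => x == (15:Int)) [1,3,5,7,10,15,20]).getD 0 = 5 by decide]
  · norm_num [List.find?, PySem.List.index?, List.idxOf?, bwmGo_val6 w (by omega) (by omega), show ¬ (1:Int) ≥ w by omega, show ¬ (3:Int) ≥ w by omega, show ¬ (5:Int) ≥ w by omega, show ¬ (7:Int) ≥ w by omega, show ¬ (10:Int) ≥ w by omega, show ¬ (15:Int) ≥ w by omega, show (20:Int) ≥ w by omega,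
      show (List.findIdx? (fun x => x == (20:Int)) [1,3,5,7,10,15,20]).getD 0 = 6 by decide]
  · norm_num [List.find?, bwmGo_val7 w (by omega), show ¬ (1:Int) ≥ w by omega, show ¬ (3:Int) ≥ w by omega, show ¬ (5:Int) ≥ w by omega, show ¬ (7:Int) ≥ w by omega, show ¬ (10:Int) ≥ w by omega, show ¬ (15:Int) ≥ w by omega, show ¬ (20:Int) ≥ w by omega]
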